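-- pv_equiv track=rewrite | github.com/ettynan/Coding_Challenges | python_challenges/62_Unique_words.py | find_unique_words
-- ===== SOURCE A (Python) =====
-- def find_unique_words(words):
--     '''Takes in a list of words and returns the unique words '''
--     # Dictionary to store the canonical form as the key and the original words as values
--     canonical_map = {}
--
--     for word in words:
--         # Create the canonical form by sorting the word
--         sorted_word = ''.join(sorted(word))
--         # Add the word to its canonical group
--         if sorted_word in canonical_map:
--             canonical_map[sorted_word].append(word)
--         else:
--             canonical_map[sorted_word] = [word]
--
--     # Retrieve all words that are unique within their canonical group
--     unique_words = []
--     for group in canonical_map.values():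
--         if len(group) == 1:  # Only one word in this group
--             unique_words.append(group[0])
--
--     return unique_words
-- ===== SOURCE B (Python) =====
-- def find_unique_words(words):
--     '''Takes in a list of words and returns the unique words '''
--     # Brute force: a word is unique iff no OTHER position in the list holds an
--     # anagram of it.  Emits unique words in input order, which coincides with
--     # A's canonical-first-appearance order because unique words are alone in
--     # their group.
--     result = []
--     for i, word in enumerate(words):
--         key = sorted(word)
--         if not any(j != i and sorted(other) == key for j, other in enumerate(words)):
--             result.append(word)
--     return result
-- ===== Notes on version B (the rewrite author's own statement) =====
-- stated objective: alternative
-- what changed: B drops the canonical-form dictionary entirely: it is a brute-force quadratic scan that keeps a word iff no other position in the list holds an anagram of it (inner any over enumerate), trading A's single grouping pass for an index-based pairwise comparison.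
import Mathlib
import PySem

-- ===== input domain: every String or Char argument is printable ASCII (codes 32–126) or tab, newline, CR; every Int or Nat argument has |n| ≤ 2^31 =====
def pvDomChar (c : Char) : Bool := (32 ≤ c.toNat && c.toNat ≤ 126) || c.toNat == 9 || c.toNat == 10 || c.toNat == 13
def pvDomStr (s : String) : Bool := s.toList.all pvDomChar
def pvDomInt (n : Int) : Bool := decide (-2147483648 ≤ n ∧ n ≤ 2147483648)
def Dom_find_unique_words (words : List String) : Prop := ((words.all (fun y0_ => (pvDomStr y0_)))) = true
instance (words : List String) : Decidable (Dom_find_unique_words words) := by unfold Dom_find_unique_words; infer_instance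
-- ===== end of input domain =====

-- B replaces A's canonical-form dictionary by a brute-force pairwise scan: a word is kept
-- iff no other position in the list holds an anagram of it (alternative algorithm, not faster).


-- ===== PORT A =====
-- ''.join(sorted(word))
def canonA (word : String) : String := String.ofList (PySem.List.sorted word.toList (fun c => c) false)

def find_unique_words (words : List String) : List String :=
  let canonical_map : PySem.Dict String (List String) :=
    words.foldl (fun d word =>
      let sorted_word := canonA word
      match d.get? sorted_word with
      | some group => d.insert sorted_word (group ++ [word])   -- canonical_map[sorted_word].append(word)
      | none => d.insert sorted_word [word]) PySem.Dict.empty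
  -- for group in canonical_map.values(): if len(group) == 1: unique_words.append(group[0])
  canonical_map.values.foldl
    (fun unique_words group =>
      if group.length == 1 then
        unique_words ++ [(PySem.List.pyGet? group 0).getD ""]  -- group[0]; the default is unreachable (length = 1)
      else unique_words) []

-- ===== PORT B =====
-- sorted(word) : a list of characters
def canonL (word : String) : List Char := PySem.List.sorted word.toList (fun c => c) false

def find_unique_words_alt (words : List String) : List String :=
  (PySem.List.enumerate words 0).foldl
    (fun result p =>
      let key := canonL p.2
      -- if not any(j != i and sorted(other) == key …): result.append(word)
      if !(PySem.List.enumerate words 0).any (fun q => q.1 != p.1 && (canonL q.2 == key))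
      then result ++ [p.2] else result) []

-- ===== PRECONDITION & SPEC =====
def Spec_find_unique_words (words : List String) (out : List String) : Prop := out = find_unique_words_alt words
instance (words : List String) (out : List String) : Decidable (Spec_find_unique_words words out) := by unfold Spec_find_unique_words; infer_instance

-- ===== CLAIM (what is proved, stated in full; the proofs are below) =====
def Claim_equal_find_unique_words : Prop := ∀ (words : List String), Dom_find_unique_words words → Spec_find_unique_words words (find_unique_words words)

-- ===== LEMMAS AND PROOFS =====

-- the group of words of ws (in order) whose canonical form is c
def Gf (ws : List String) (c : String) : List String := ws.filter (fun w => canonA w == c)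

-- A's loop step is Dict.modify
theorem stepA_eq_modify (d : PySem.Dict String (List String)) (w : String) :
    (let sorted_word := canonA w
     match d.get? sorted_word with
     | some group => d.insert sorted_word (group ++ [w])
     | none => d.insert sorted_word [w]) = d.modify (canonA w) [] (· ++ [w]) := by
  show (match d.get? (canonA w) with
        | some group => d.insert (canonA w) (group ++ [w])
        | none => d.insert (canonA w) [w]) = d.insert (canonA w) (d.getD (canonA w) [] ++ [w])
  cases h : d.get? (canonA w) with
  | none => simp [PySem.Dict.getD_eq_get?_getD, h]
  | some g => simp [PySem.Dict.getD_eq_get?_getD, h]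

-- A's dict, rewritten as a modify-fold over key/value pairs
theorem dictA_eq (words : List String) :
    words.foldl (fun d word =>
      let sorted_word := canonA word
      match d.get? sorted_word with
      | some group => d.insert sorted_word (group ++ [word])
      | none => d.insert sorted_word [word]) PySem.Dict.empty
    = (words.map (fun w => (canonA w, w))).foldl
        (fun d p => d.modify p.1 [] (· ++ [p.2])) PySem.Dict.empty := by
  rw [List.foldl_map]
  congr 1
  funext d w
  exact stepA_eq_modify d w

theorem dictA_getD (words : List String) (c : String) :
    ((words.map (fun w => (canonA w, w))).foldl
        (fun d p => d.modify p.1 [] (· ++ [p.2])) PySem.Dict.empty).getD c []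
    = Gf words c := by
  rw [PySem.Dict.getD_foldl_modify_append]
  simp only [Gf, List.filter_map]
  simp only [PySem.Dict.getD_empty, List.nil_append]
  rw [List.map_map]
  exact List.map_id' _

theorem dictA_keys (words : List String) :
    ((words.map (fun w => (canonA w, w))).foldl
        (fun d p => d.modify p.1 [] (· ++ [p.2])) PySem.Dict.empty).keys
    = PySem.Set.ofList (words.map canonA) := by
  rw [PySem.Dict.keys_foldl_modify_key]
  simp [List.map_map, Function.comp_def, PySem.Set.update_nil_left]

theorem dictA_nodup (words : List String) :
    ((words.map (fun w => (canonA w, w))).foldl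
        (fun d p => d.modify p.1 [] (· ++ [p.2])) PySem.Dict.empty).keys.Nodup := by
  exact PySem.Dict.nodup_keys_foldl_modify_key _ _ _ _ _ PySem.Dict.nodup_keys_empty

-- A's result: the singleton-group canonical forms in first-appearance order, each sending its word
theorem resultA (words : List String) :
    find_unique_words words
    = ((PySem.Set.ofList (words.map canonA)).filter
        (fun k => (Gf words k).length == 1)).map
      (fun k => (PySem.List.pyGet? (Gf words k) 0).getD "") := by
  show (words.foldl (fun d word =>
      let sorted_word := canonA word
      match d.get? sorted_word with
      | some group => d.insert sorted_word (group ++ [word])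
      | none => d.insert sorted_word [word]) PySem.Dict.empty).values.foldl
    (fun unique_words group =>
      if group.length == 1 then unique_words ++ [(PySem.List.pyGet? group 0).getD ""]
      else unique_words) [] = _
  rw [dictA_eq, PySem.List.foldl_append_if,
      PySem.Dict.values_eq_map_keys _ (dictA_nodup words) [],
      dictA_keys, List.filter_map, List.map_map]
  simp only [List.nil_append, Function.comp_def, dictA_getD]

-- canonL equality as Bool is canonA equality as Bool
theorem canonL_beq (u v : String) : (canonL u == canonL v) = (canonA u == canonA v) := by
  rw [Bool.eq_iff_iff]
  simp [canonA, canonL, String.ofList_inj]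

-- the members of enumerate words 0 with canonical form canonA w
def Fm (words : List String) (w : String) : List (Int × String) :=
  (PySem.List.enumerate words 0).filter (fun q => canonA q.2 == canonA w)

theorem Fm_length (words : List String) (w : String) :
    (Fm words w).length = (Gf words (canonA w)).length := by
  have : Gf words (canonA w) = (Fm words w).map (fun q => q.2) := by
    conv_lhs => rw [Gf, ← PySem.List.map_snd_enumerate words 0]
    rw [List.filter_map]
    rfl
  rw [this, List.length_map]

-- B's inner 'any' for a member (i, w) of enumerate decides exactly 'the group of w is not a singleton'
theorem inner_char (words : List String) (i : Int) (w : String)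
    (hp : (i, w) ∈ PySem.List.enumerate words 0) :
    (!(PySem.List.enumerate words 0).any (fun q => q.1 != i && (canonL q.2 == canonL w)))
    = ((Gf words (canonA w)).length == 1) := by
  have hmem : (i, w) ∈ Fm words w := by
    rw [Fm, List.mem_filter]
    exact ⟨hp, by simp⟩
  have hpw : (Fm words w).Pairwise (fun p q => p.1 < q.1) :=
    (PySem.List.pairwise_lt_enumerate words 0).filter _
  have key : (∀ q ∈ Fm words w, q.1 = i) ↔ (Fm words w).length = 1 := by
    constructor
    · intro h
      rcases hF : Fm words w with _ | ⟨x, _ | ⟨y, t⟩⟩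
      · rw [hF] at hmem; simp at hmem
      · simp
      · rw [hF] at hpw h
        have hx := h x (by simp)
        have hy := h y (by simp)
        have hlt := (List.pairwise_cons.mp hpw).1 y (by simp)
        rw [hx, hy] at hlt
        exact absurd hlt (lt_irrefl i)
    · intro h q hq
      obtain ⟨x, hx⟩ := List.length_eq_one_iff.mp h
      rw [hx] at hq hmem
      simp only [List.mem_singleton] at hq hmem
      rw [hq, ← hmem]
  have left : ((PySem.List.enumerate words 0).any
        (fun q => q.1 != i && (canonL q.2 == canonL w)) = false)
      ↔ ∀ q ∈ Fm words w, q.1 = i := by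
    rw [List.any_eq_false]
    simp only [Fm, List.mem_filter, canonL_beq, Bool.and_eq_true, bne_iff_ne, beq_iff_eq]
    constructor
    · intro h q hq
      by_contra hne
      exact absurd (h q hq.1) (by simp [hne, hq.2])
    · intro h q hq
      by_cases hc : canonA q.2 = canonA w
      · simp [h q ⟨hq, hc⟩]
      · simp [hc]
  rw [Bool.eq_iff_iff, Bool.not_eq_true', left, key, Fm_length]
  simp

-- B's result: the input words whose canonical group is a singleton
theorem resultB (words : List String) :
    find_unique_words_alt words = words.filter (fun w => (Gf words (canonA w)).length == 1) := by
  show (PySem.List.enumerate words 0).foldl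
    (fun result p =>
      if !(PySem.List.enumerate words 0).any (fun q => q.1 != p.1 && (canonL q.2 == canonL p.2))
      then result ++ [p.2] else result) [] = _
  simp only [PySem.List.foldl_append_if
      (p := fun p : Int × String =>
        !(PySem.List.enumerate words 0).any (fun q => q.1 != p.1 && (canonL q.2 == canonL p.2)))
      (f := fun p : Int × String => p.2), List.nil_append]
  rw [List.filter_congr (fun p hp => inner_char words p.1 p.2 hp)]
  have hw : words.filter (fun w => (Gf words (canonA w)).length == 1)
      = ((PySem.List.enumerate words 0).map (fun p => p.2)).filter
          (fun w => (Gf words (canonA w)).length == 1) := by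
    rw [PySem.List.map_snd_enumerate]
  rw [hw, List.filter_map]
  rfl

theorem Gf_cons (w : String) (ws : List String) (c : String) :
    Gf (w :: ws) c = if canonA w == c then w :: Gf ws c else Gf ws c := by
  simp only [Gf, List.filter_cons]

theorem Gf_cons_ne (w : String) (ws : List String) (c : String) (h : c ≠ canonA w) :
    Gf (w :: ws) c = Gf ws c := by
  rw [Gf_cons, if_neg]
  simp [Ne.symm h]

-- the core order argument: scanning the canonical forms in first-appearance order and emitting
-- the sole member of each singleton group equals filtering the input list for unique words
theorem core (excl : List String) (ws : List String) :
    ((PySem.Set.ofList (ws.map canonA)).filter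
        (fun k => !excl.contains k && (Gf ws k).length == 1)).map
      (fun k => (PySem.List.pyGet? (Gf ws k) 0).getD "")
    = ws.filter (fun w => !excl.contains (canonA w) && (Gf ws (canonA w)).length == 1) := by
  induction ws generalizing excl with
  | nil => simp
  | cons w ws ih =>
    have hd : Gf (w :: ws) (canonA w) = w :: Gf ws (canonA w) := by simp [Gf_cons]
    have tail : (((PySem.Set.ofList (ws.map canonA)).filter (fun y => !(y == canonA w))).filter
          (fun k => !excl.contains k && ((Gf (w::ws) k).length == 1))).map
            (fun k => (PySem.List.pyGet? (Gf (w::ws) k) 0).getD "")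
        = ws.filter (fun u => !((canonA w :: excl).contains (canonA u)) && ((Gf ws (canonA u)).length == 1)) := by
      rw [List.filter_filter]
      have hp : ∀ k ∈ (PySem.Set.ofList (ws.map canonA)),
          ((!excl.contains k && ((Gf (w::ws) k).length == 1)) && (!(k == canonA w)))
          = (!((canonA w :: excl).contains k) && ((Gf ws k).length == 1)) := by
        intro k _
        by_cases hk : k = canonA w
        · subst hk; simp
        · rw [Gf_cons_ne _ _ _ hk]
          simp [hk]
      rw [List.filter_congr hp]
      rw [List.map_congr_left (g := fun k => (PySem.List.pyGet? (Gf ws k) 0).getD "") ?hm]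
      · exact ih (canonA w :: excl)
      case hm =>
        intro k hk
        rw [List.mem_filter] at hk
        have : k ≠ canonA w := by
          rcases hk with ⟨-, hk2⟩
          simp only [Bool.and_eq_true, Bool.not_eq_true'] at hk2
          intro he; subst he
          simp at hk2
        rw [Gf_cons_ne _ _ _ this]
    have tail2 : ws.filter (fun u => !excl.contains (canonA u) && ((Gf (w::ws) (canonA u)).length == 1))
        = ws.filter (fun u => !((canonA w :: excl).contains (canonA u)) && ((Gf ws (canonA u)).length == 1)) := by
      apply List.filter_congr
      intro u hu
      by_cases hc : canonA u = canonA w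
      · rw [hc, hd]
        have hmem : u ∈ Gf ws (canonA w) := by
          simp [Gf, List.mem_filter, hu, hc]
        have : (w :: Gf ws (canonA w)).length ≠ 1 := by
          simp only [List.length_cons]
          have := List.length_pos_of_mem hmem
          omega
        simp
        exact fun _ => List.ne_nil_of_mem hmem
      · rw [Gf_cons_ne _ _ _ hc]
        simp [hc]
    simp only [List.map_cons, PySem.Set.ofList_cons,
      show PySem.Set.discard (PySem.Set.ofList (ws.map canonA)) (canonA w)
         = (PySem.Set.ofList (ws.map canonA)).filter (fun y => !(y == canonA w)) from rfl,
      List.filter_cons]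
    by_cases hcond : (!excl.contains (canonA w) && ((Gf (w::ws) (canonA w)).length == 1)) = true
    · rw [if_pos hcond, if_pos hcond, List.map_cons, tail, tail2]
      congr 1
      rw [hd]
      simp [PySem.List.pyGet?, PySem.List.pyIdx?]
    · rw [if_neg hcond, if_neg hcond, tail, tail2]

-- ===== VERDICT (by name: the statement is the Claim_ definition above) =====
theorem find_unique_words_spec : Claim_equal_find_unique_words := by
  intro words _
  show find_unique_words words = find_unique_words_alt words
  rw [resultA, resultB]
  simpa using core [] words
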